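-- pv_equiv track=rewrite | github.com/ahhardin/advent-of-code | years/2021/03.py | part_1
-- ===== SOURCE A (Python) =====
-- def part_1(data):
--     size = len(data[0])
--     gamma = ""
--     epsilon = ""
--     for i in range(0, size):
--         digits_at_idx = [d[i] for d in data]
--         if digits_at_idx.count('1') > len(data) // 2:
--             gamma += '1'
--             epsilon += '0'
--         else:
--             gamma += '0'
--             epsilon += '1'
--     return gamma, epsilon
-- ===== SOURCE B (Python) =====
-- def part_1(data):
--     size = len(data[0])
--     n = len(data)
--     counts = [0] * size
--     for d in data:
--         counts = [c + (ch == '1') for c, ch in zip(counts, d)]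
--     half = n // 2
--     gamma = ''.join('1' if c > half else '0' for c in counts)
--     epsilon = ''.join('0' if c > half else '1' for c in counts)
--     return gamma, epsilon
-- ===== Notes on version B (the rewrite author's own statement) =====
-- stated objective: alternative
-- what changed: B replaces the per-column scans (building a fresh column list and counting '1's for each column) by one row-major pass that accumulates a counts table via pointwise zip-addition, then derives both output strings from the table in a single pass over it.
import Mathlib
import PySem

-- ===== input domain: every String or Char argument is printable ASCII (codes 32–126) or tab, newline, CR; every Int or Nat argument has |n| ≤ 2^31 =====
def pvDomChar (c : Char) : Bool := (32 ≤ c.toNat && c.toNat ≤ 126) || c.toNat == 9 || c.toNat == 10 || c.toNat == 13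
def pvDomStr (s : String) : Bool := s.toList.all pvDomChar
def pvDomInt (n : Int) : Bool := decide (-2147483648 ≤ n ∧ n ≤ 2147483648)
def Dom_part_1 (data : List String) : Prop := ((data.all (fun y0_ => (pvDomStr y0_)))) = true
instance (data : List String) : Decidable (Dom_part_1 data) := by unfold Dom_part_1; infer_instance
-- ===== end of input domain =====

-- B replaces A's per-column scans by one row-major pass building a counts table (pointwise zip-add),
-- then reads both strings off the table; equivalence proved on nonempty inputs whose rows are at
-- least as long as the first row (elsewhere A raises IndexError).


-- ===== PORT A =====
-- literal transliteration of A: for each column i, build the list of chars at index i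
-- (PySem.Str.pyGet? = Python's d[i]; none would be an IndexError, excluded by Pre_),
-- count '1's, compare with len(data)//2, append to gamma/epsilon (kept as List Char,
-- packed with String.ofList at the end since Lean's String.append is kernel-opaque).
def part_1 (data : List String) : String × String :=
  match data with
  | [] => ("", "")  -- data[0] raises IndexError in Python; excluded by Pre_
  | d0 :: _ =>
    let size := PySem.Str.len d0
    let ge := (PySem.List.pyRange 0 size).foldl
      (fun (ge : List Char × List Char) i =>
        let digits_at_idx := data.map (fun d => PySem.Str.pyGet? d i)
        if ((PySem.List.count digits_at_idx (some '1') : Int) >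
            PySem.Int.floordiv (data.length : Int) 2) then
          (ge.1 ++ ['1'], ge.2 ++ ['0'])
        else
          (ge.1 ++ ['0'], ge.2 ++ ['1']))
      ([], [])
    (String.ofList ge.1, String.ofList ge.2)

-- ===== PORT B =====
-- literal transliteration of Source B: one row-major fold updating a counts table by
-- pointwise zip-addition, then both strings are mapped off the table.
def part_1_alt (data : List String) : String × String :=
  match data with
  | [] => ("", "")  -- len(data[0]) raises IndexError in Python; excluded by Pre_
  | d0 :: _ =>
    let size := d0.toList.length
    let n := data.length
    let counts := data.foldl
      (fun (cs : List Nat) d =>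
        (cs.zip d.toList).map (fun p => p.1 + (if p.2 == '1' then 1 else 0)))
      (List.replicate size 0)
    let half := n / 2
    (String.ofList (counts.map (fun c => if c > half then '1' else '0')),
     String.ofList (counts.map (fun c => if c > half then '0' else '1')))

-- ===== PRECONDITION & SPEC =====
-- Pre_ excludes exactly the inputs where A raises IndexError: empty data (data[0]),
-- and rows shorter than the first row (d[i] for some i < len(data[0])).
def Pre_part_1 (data : List String) : Prop :=
  data ≠ [] ∧ ∀ d ∈ data, (data.headD "").toList.length ≤ d.toList.length
instance (data : List String) : Decidable (Pre_part_1 data) := by unfold Pre_part_1; infer_instance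
def pvWitness_part_1 : List String := ["101", "010", "111"]
def Spec_part_1 (data : List String) (out : String × String) : Prop := out = part_1_alt data
instance (data : List String) (out : String × String) : Decidable (Spec_part_1 data out) := by unfold Spec_part_1; infer_instance

-- ===== CLAIM (what is proved, stated in full; the proofs are below) =====
def Claim_equal_part_1 : Prop := ∀ (data : List String), Dom_part_1 data → Pre_part_1 data → Spec_part_1 data (part_1 data)

-- ===== LEMMAS AND PROOFS =====

-- one B-step: zip-adding a row of length ≥ size into a table that is a map over range size
theorem pv_step_map (f : Nat → Nat) (l : List Char) (size : Nat) (h : size ≤ l.length) :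
    (((List.range size).map f).zip l).map (fun p => p.1 + (if p.2 == '1' then 1 else 0))
    = (List.range size).map (fun i => f i + (if l[i]? == some '1' then 1 else 0)) := by
  apply List.ext_getElem
  · simp [Nat.min_eq_left h]
  · intro i h1 h2
    have hi : i < size := by simpa [Nat.min_eq_left h] using h1
    have hil : i < l.length := lt_of_lt_of_le hi h
    simp [List.getElem_zip, List.getElem?_eq_getElem hil]

-- B's whole fold: the counts table is a map over range size of column counts
theorem pv_counts_fold (rows : List String) (size : Nat) (f : Nat → Nat)
    (h : ∀ d ∈ rows, size ≤ d.toList.length) :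
    rows.foldl
      (fun (cs : List Nat) d =>
        (cs.zip d.toList).map (fun p => p.1 + (if p.2 == '1' then 1 else 0)))
      ((List.range size).map f)
    = (List.range size).map
        (fun i => f i + rows.countP (fun d => d.toList[i]? == some '1')) := by
  induction rows generalizing f with
  | nil => simp
  | cons d rows ih =>
    simp only [List.foldl_cons]
    rw [pv_step_map f d.toList size (h d (by simp))]
    rw [ih (fun i => f i + (if d.toList[i]? == some '1' then 1 else 0))
        (fun x hx => h x (by simp [hx]))]
    apply List.map_congr_left
    intro i _
    simp only [List.countP_cons]
    omega

-- A's whole fold: it appends exactly the characters decided by the per-column test P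
theorem pv_foldA (P : Int → Prop) [DecidablePred P] (l : List Int) (a b : List Char) :
    l.foldl
      (fun (ge : List Char × List Char) i =>
        if P i then (ge.1 ++ ['1'], ge.2 ++ ['0']) else (ge.1 ++ ['0'], ge.2 ++ ['1']))
      (a, b)
    = (a ++ l.map (fun i => if P i then '1' else '0'),
       b ++ l.map (fun i => if P i then '0' else '1')) := by
  induction l generalizing a b with
  | nil => simp
  | cons i l ih =>
    simp only [List.foldl_cons, List.map_cons]
    by_cases hg : P i <;> simp [hg, ih]

-- ===== VERDICT (by name: the statement is the Claim_ definition above) =====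
theorem part_1_spec : Claim_equal_part_1 := by
  intro data _ hpre
  unfold Spec_part_1
  obtain ⟨hne, hlen⟩ := hpre
  match data with
  | [] => exact absurd rfl hne
  | d0 :: rest =>
    simp only [part_1, part_1_alt]
    have hlen' : ∀ d ∈ d0 :: rest, d0.toList.length ≤ d.toList.length := by
      simpa using hlen
    -- B's counts table
    have hrep : List.replicate d0.toList.length (0 : Nat)
        = (List.range d0.toList.length).map (fun _ => 0) := by
      simp [List.map_const']
    rw [hrep, pv_counts_fold (d0 :: rest) d0.toList.length (fun _ => 0) hlen']
    -- A's range and fold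
    have hsz : PySem.Str.len d0 = ((d0.toList.length : Nat) : Int) := by
      simp [PySem.Str.len_eq]
    rw [hsz, PySem.List.pyRange_zero_nat]
    rw [pv_foldA (fun i =>
        ((PySem.List.count ((d0 :: rest).map (fun d => PySem.Str.pyGet? d i)) (some '1') : Int) >
          PySem.Int.floordiv ((d0 :: rest).length : Int) 2))
      ((List.range d0.toList.length).map (fun k : Nat => (k : Int))) [] []]
    simp only [List.nil_append, List.map_map, Prod.mk.injEq]
    constructor <;>
    · congr 1
      apply List.map_congr_left
      intro k _
      have hcnt : PySem.List.count ((d0 :: rest).map (fun d => PySem.Str.pyGet? d (k : Int))) (some '1')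
          = (d0 :: rest).countP (fun d => d.toList[k]? == some '1') := by
        simp only [PySem.List.count, List.count_eq_countP, List.countP_map]
        apply List.countP_congr
        intro d _
        simp
      have hfd : PySem.Int.floordiv ((d0 :: rest).length : Int) 2
          = (((d0 :: rest).length / 2 : Nat) : Int) := by
        exact_mod_cast PySem.Int.floordiv_natCast (d0 :: rest).length 2
      simp only [Function.comp_apply, hcnt, hfd, Nat.zero_add, Nat.cast_lt]
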